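-- pv_equiv track=rewrite | github.com/kangshani/trip_finder | lib/preference_engine.py | _dest_slug
-- ===== SOURCE A (Python) =====
-- def _dest_slug(dest: dict) -> str:
--     """Derive the file slug from a destination dict."""
--     name = dest.get("display_name", dest.get("name", "unknown"))
--     # Convert "Rome, Italy (Summer)" -> "rome-italy-summer"
--     slug = name.lower()
--     for ch in "(),.'\"!":
--         slug = slug.replace(ch, "")
--     slug = slug.replace("&", "and")
--     parts = slug.split()
--     return "-".join(parts)
-- ===== SOURCE B (Python) =====
-- def _dest_slug(dest: dict) -> str:
--     """Derive the file slug from a destination dict (single-pass version)."""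
--     name = dest.get("display_name", dest.get("name", "unknown"))
--     out = []
--     for ch in name:
--         cl = ch.lower()
--         if cl in "(),.'\"!":
--             continue
--         elif cl == "&":
--             out.append("and")
--         else:
--             out.append(cl)
--     slug = "".join(out)
--     parts = slug.split()
--     return "-".join(parts)
-- ===== Notes on version B (the rewrite author's own statement) =====
-- stated objective: alternative
-- what changed: replaces the seven sequential whole-string .replace passes (plus the '&'->'and' pass) with a single accumulator loop over the name that lowercases, drops punctuation or expands '&' per character
import Mathlib
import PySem

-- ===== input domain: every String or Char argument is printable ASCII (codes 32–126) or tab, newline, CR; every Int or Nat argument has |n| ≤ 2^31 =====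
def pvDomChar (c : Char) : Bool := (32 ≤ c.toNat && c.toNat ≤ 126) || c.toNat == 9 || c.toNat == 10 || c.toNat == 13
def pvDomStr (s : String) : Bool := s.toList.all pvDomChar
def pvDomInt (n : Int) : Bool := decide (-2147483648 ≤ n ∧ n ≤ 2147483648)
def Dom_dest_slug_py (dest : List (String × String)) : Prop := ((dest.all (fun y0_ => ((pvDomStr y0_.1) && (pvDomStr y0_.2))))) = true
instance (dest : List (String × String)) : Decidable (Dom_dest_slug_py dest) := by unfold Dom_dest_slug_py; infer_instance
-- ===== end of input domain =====

-- B replaces A's seven sequential whole-string .replace passes by a single per-character accumulator pass; same result, stated and proved below.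


-- ===== PORT A =====
-- literal transliteration of A: lookup, lower, seven single-char replace passes, '&'->'and', split, join
def dest_slug_py (dest : List (String × String)) : String :=
  let d := PySem.Dict.ofList dest
  let name := d.getD "display_name" (d.getD "name" "unknown")
  let slug := PySem.Str.lower name
  let slug := ("(),.'\"!".toList).foldl (fun s ch => PySem.Str.replace s (String.ofList [ch]) "") slug
  let slug := PySem.Str.replace slug "&" "and"
  let parts := PySem.Str.split₀ slug
  PySem.Str.join "-" parts

-- ===== PORT B =====
-- single pass: lowercase each char, skip punctuation, expand '&' to "and"
def slugChars : List Char → List Char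
  | [] => []
  | c :: rest =>
    let cl := PySem.Chars.lowerChar c
    if cl ∈ "(),.'\"!".toList then slugChars rest
    else if cl = '&' then 'a' :: 'n' :: 'd' :: slugChars rest
    else cl :: slugChars rest

def dest_slug_py_alt (dest : List (String × String)) : String :=
  let d := PySem.Dict.ofList dest
  let name := d.getD "display_name" (d.getD "name" "unknown")
  let slug := String.ofList (slugChars name.toList)
  let parts := PySem.Str.split₀ slug
  PySem.Str.join "-" parts

-- ===== PRECONDITION & SPEC =====
def Spec_dest_slug_py (dest : List (String × String)) (out : String) : Prop := out = dest_slug_py_alt dest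
instance (dest : List (String × String)) (out : String) : Decidable (Spec_dest_slug_py dest out) := by unfold Spec_dest_slug_py; infer_instance

-- ===== CLAIM (what is proved, stated in full; the proofs are below) =====
def Claim_equal_dest_slug_py : Prop := ∀ (dest : List (String × String)), Dom_dest_slug_py dest → Spec_dest_slug_py dest (dest_slug_py dest)

-- ===== LEMMAS AND PROOFS =====

-- replace with a single-char pattern acts characterwise
lemma replace_go_single (p : Char) (new : List Char) :
    ∀ (fuel : Nat) (s acc : List Char), s.length ≤ fuel →
      PySem.Chars.replace.go [p] new fuel s acc =
        acc.reverse ++ s.flatMap (fun c => if c = p then new else [c]) := by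
  intro fuel
  induction fuel with
  | zero => intro s acc h; cases s <;> simp_all [PySem.Chars.replace.go]
  | succ n ih =>
    intro s acc h
    cases s with
    | nil => simp [PySem.Chars.replace.go]
    | cons c t =>
      simp only [PySem.Chars.replace.go]
      by_cases hc : c = p
      · subst hc
        rw [if_pos (by simp [List.isPrefixOf])]
        rw [ih _ _ (by simpa using Nat.le_of_succ_le_succ h)]
        simp
      · rw [if_neg (by simp [List.isPrefixOf]; exact fun e => hc e.symm)]
        rw [ih _ _ (Nat.le_of_succ_le_succ h)]
        simp [hc]

lemma replace_single (p : Char) (new s : List Char) :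
    PySem.Chars.replace s [p] new = s.flatMap (fun c => if c = p then new else [c]) := by
  simp only [PySem.Chars.replace, List.isEmpty]
  rw [replace_go_single p new s.length s [] (le_refl _)]
  simp

lemma replace_del (p : Char) (s : List Char) :
    PySem.Chars.replace s [p] [] = s.filter (fun c => !(c == p)) := by
  rw [replace_single]
  induction s with
  | nil => rfl
  | cons c t ih => by_cases h : c = p <;> simp [h, ih]

-- the key pipeline equality on characters
lemma slugChars_eq (cs : List Char) :
    PySem.Chars.replace
      ((((((((cs.map PySem.Chars.lowerChar).filter (fun c => !(c == '('))).filter (fun c => !(c == ')'))).filter (fun c => !(c == ','))).filter (fun c => !(c == '.'))).filter (fun c => !(c == '\''))).filter (fun c => !(c == '"'))).filter (fun c => !(c == '!')))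
      ['&'] ['a','n','d'] = slugChars cs := by
  induction cs with
  | nil => rfl
  | cons c t ih =>
    rw [slugChars]
    have hlit : "(),.'\"!".toList = (['(',')',',','.','\'','"','!'] : List Char) := rfl
    rw [hlit]
    simp only [List.map_cons, List.filter_cons]
    generalize PySem.Chars.lowerChar c = cl
    by_cases h : cl ∈ (['(',')',',','.','\'','"','!'] : List Char)
    · rw [if_pos h]
      simp only [List.mem_cons, List.not_mem_nil, or_false] at h
      rcases h with rfl | rfl | rfl | rfl | rfl | rfl | rfl <;> simpa using ih
    · rw [if_neg h]
      simp only [List.mem_cons, List.not_mem_nil, or_false, not_or] at h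
      obtain ⟨h1, h2, h3, h4, h5, h6, h7⟩ := h
      rw [replace_single]
      rw [replace_single] at ih
      simp only [List.filter_filter] at ih
      by_cases h8 : cl = '&'
      · simp [h8, ih]
      · simp [h1, h2, h3, h4, h5, h6, h7, h8, ih]

-- ===== VERDICT (by name: the statement is the Claim_ definition above) =====
theorem dest_slug_py_spec : Claim_equal_dest_slug_py := by
  intro dest _
  unfold Spec_dest_slug_py dest_slug_py dest_slug_py_alt
  have key : ∀ name : String,
      PySem.Str.replace
        (("(),.'\"!".toList).foldl
          (fun s ch => PySem.Str.replace s (String.ofList [ch]) "") (PySem.Str.lower name))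
        "&" "and" = String.ofList (slugChars name.toList) := by
    intro name
    apply String.toList_inj.mp
    have hlit : "(),.'\"!".toList = (['(',')',',','.','\'','"','!'] : List Char) := rfl
    rw [hlit]
    simp only [List.foldl_cons, List.foldl_nil, PySem.Str.toList_replace, PySem.Str.toList_lower,
      String.toList_ofList]
    have h1 : ("" : String).toList = ([] : List Char) := rfl
    have h2 : ("&" : String).toList = ['&'] := rfl
    have h3 : ("and" : String).toList = ['a','n','d'] := rfl
    rw [h1, h2, h3]
    simp only [replace_del]
    exact slugChars_eq name.toList
  simp only [key]
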